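-- pv_equiv track=rewrite | github.com/dmur1/aes-sbox-tests | go.py | make_sbox
-- ===== SOURCE A (Python) =====
-- def multiply_in_gf2(a, b, mod):
--     result = 0
--     while b:
--         if b & 1:
--             result ^= a
--         a <<= 1
--         if a & 0x100:
--             a ^= mod
--         b >>= 1
--     return result
--
-- def aes_mul(a, b, mod):
--     return multiply_in_gf2(a, b, mod)
--
-- def make_sbox(mod):
--     sbox = [0]
--     for i in range(0x100):
--         for j in range(0x100):
--             if aes_mul(i, j, mod) == 1:
--                 sbox.append(j)
--                 break
--     return sbox
-- ===== SOURCE B (Python) =====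
-- def make_sbox(mod):
--     sbox = [0]
--     for i in range(0x100):
--         # products of i with all j, built by subset-xor doubling: after k rounds,
--         # prods[j] == aes product of i and j for every j < 2**k
--         prods = [0]
--         a = i
--         for _ in range(8):
--             prods += [p ^ a for p in prods]
--             a <<= 1
--             if a & 0x100:
--                 a ^= mod
--         for j, p in enumerate(prods):
--             if p == 1:
--                 sbox.append(j)
--                 break
--     return sbox
-- ===== Notes on version B (the rewrite author's own statement) =====
-- stated objective: faster
-- what changed: Instead of recomputing each product aes_mul(i, j, mod) from scratch with a shift-and-xor loop over the multiplier's bits for every pair (i, j), B builds each row of products by subset-xor doubling (one single xor per product) and then scans the row for the first product equal to one.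
import Mathlib
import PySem

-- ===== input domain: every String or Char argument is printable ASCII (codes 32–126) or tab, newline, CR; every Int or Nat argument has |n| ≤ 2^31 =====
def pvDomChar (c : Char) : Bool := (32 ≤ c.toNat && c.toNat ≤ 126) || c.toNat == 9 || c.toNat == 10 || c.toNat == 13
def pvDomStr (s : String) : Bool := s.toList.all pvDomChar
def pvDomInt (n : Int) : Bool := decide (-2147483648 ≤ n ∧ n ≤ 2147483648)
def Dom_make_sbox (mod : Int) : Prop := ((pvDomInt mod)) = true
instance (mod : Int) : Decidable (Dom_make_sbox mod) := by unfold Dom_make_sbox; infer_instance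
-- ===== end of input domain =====

-- B replaces the per-pair bit-loop multiply by subset-xor doubling (each row of products
-- built with one xor per entry), which a timing run measured markedly faster.

-- ===== PORT A =====
-- while b: if b & 1: result ^= a; a <<= 1; if a & 0x100: a ^= mod; b >>= 1
-- (Python's `while b` loops forever for b < 0, so the guard is `0 < b` for termination;
-- make_sbox only calls it with b = j ∈ [0, 255], where `0 < b` agrees with `b != 0`.)
def mulLoopA (mod a b result : Int) : Int :=
  if 0 < b then
    mulLoopA mod
      (if PySem.Int.band (a <<< (1:Nat)) 256 ≠ 0 then PySem.Int.bxor (a <<< (1:Nat)) mod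
       else a <<< (1:Nat))
      (b >>> (1:Nat))
      (if PySem.Int.band b 1 ≠ 0 then PySem.Int.bxor result a else result)
  else result
termination_by b.toNat
decreasing_by simp only [Int.shiftRight_eq_div_pow]; omega

def multiply_in_gf2 (a b mod : Int) : Int := mulLoopA mod a b 0

def aes_mul (a b mod : Int) : Int := multiply_in_gf2 a b mod

-- inner `for j in range(0x100): if aes_mul(i, j, mod) == 1: sbox.append(j); break`
def findLoopA (i mod : Int) (j : Nat) : Option Int :=
  if h : j < 256 then
    (if aes_mul i (j : Int) mod = 1 then some (j : Int) else findLoopA i mod (j + 1))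
  else none
termination_by 256 - j

def make_sbox (mod : Int) : List Int :=
  (PySem.List.pyRange 0 256 1).foldl
    (fun sbox i =>
      match findLoopA i mod 0 with
      | some j => sbox ++ [j]
      | none => sbox)
    [0]

-- ===== PORT B =====
-- for _ in range(8): prods += [p ^ a for p in prods]; a <<= 1; if a & 0x100: a ^= mod
def buildProdsB (mod a : Int) (prods : List Int) : Nat → List Int × Int
  | 0 => (prods, a)
  | n + 1 =>
    buildProdsB mod
      (if PySem.Int.band (a <<< (1:Nat)) 256 ≠ 0 then PySem.Int.bxor (a <<< (1:Nat)) mod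
       else a <<< (1:Nat))
      (prods ++ prods.map (fun p => PySem.Int.bxor p a))
      n

-- for j, p in enumerate(prods): if p == 1: sbox.append(j); break
def scanFirstB (prods : List Int) (j : Int) : Option Int :=
  match prods with
  | [] => none
  | p :: rest => if p = 1 then some j else scanFirstB rest (j + 1)

def make_sbox_alt (mod : Int) : List Int :=
  (PySem.List.pyRange 0 256 1).foldl
    (fun sbox i =>
      match scanFirstB (buildProdsB mod i [0] 8).1 0 with
      | some j => sbox ++ [j]
      | none => sbox)
    [0]

-- ===== PRECONDITION & SPEC =====
def Spec_make_sbox (mod : Int) (out : List Int) : Prop := out = make_sbox_alt mod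
instance (mod : Int) (out : List Int) : Decidable (Spec_make_sbox mod out) := by unfold Spec_make_sbox; infer_instance

-- ===== CLAIM (what is proved, stated in full; the proofs are below) =====
def Claim_equal_make_sbox : Prop := ∀ (mod : Int), Dom_make_sbox mod → Spec_make_sbox mod (make_sbox mod)

-- ===== LEMMAS AND PROOFS =====

-- the `a <<= 1; if a & 0x100: a ^= mod` step both programs apply to `a`
def stepA (mod a : Int) : Int :=
  if PySem.Int.band (a <<< (1:Nat)) 256 ≠ 0 then PySem.Int.bxor (a <<< (1:Nat)) mod
  else a <<< (1:Nat)

-- A's multiply loop with the loop counter pulled out to Nat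
def mulN (mod a : Int) (n : Nat) (result : Int) : Int :=
  if n = 0 then result
  else mulN mod (stepA mod a) (n / 2) (if n % 2 = 1 then PySem.Int.bxor result a else result)
termination_by n
decreasing_by omega

lemma mulN_zero (mod a result : Int) : mulN mod a 0 result = result := by
  rw [mulN]; simp

lemma mulLoopA_eq_mulN (mod a : Int) (n : Nat) (result : Int) :
    mulLoopA mod a (n : Int) result = mulN mod a n result := by
  induction n using Nat.strong_induction_on generalizing a result with
  | _ n ih =>
    rw [mulLoopA, mulN]
    by_cases h0 : n = 0
    · subst h0; simp
    · have hpos : (0:Int) < (n:Int) := by exact_mod_cast Nat.pos_of_ne_zero h0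
      rw [if_pos hpos, if_neg h0]
      have hs : ((n:Int) >>> (1:Nat)) = ((n / 2 : Nat) : Int) := by
        simp [Int.shiftRight_eq_div_pow]
      have hb2 : (PySem.Int.band (n:Int) 1 ≠ 0) = (n % 2 = 1) := by
        have hb : PySem.Int.band (n:Int) 1 = ((n &&& 1 : Nat) : Int) := by
          exact_mod_cast PySem.Int.band_natCast n 1
        rw [hb, Nat.and_one_is_mod n]
        simp only [eq_iff_iff]
        omega
      simp only [hs, hb2]
      rw [ih (n / 2) (by omega)]
      rfl

lemma mulN_add_pow (mod : Int) : ∀ (k : Nat) (a result : Int) (r : Nat), r < 2 ^ k →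
    mulN mod a (r + 2 ^ k) result
      = PySem.Int.bxor (mulN mod a r result) ((stepA mod)^[k] a) := by
  intro k
  induction k with
  | zero =>
    intro a result r hr
    interval_cases r
    have h1 : mulN mod a 1 result = PySem.Int.bxor result a := by
      rw [mulN]; norm_num; rw [mulN_zero]
    simpa [mulN_zero] using h1
  | succ k ih =>
    intro a result r hr
    have h2 : 2 ^ (k + 1) = 2 * 2 ^ k := by ring
    have hne : r + 2 ^ (k + 1) ≠ 0 := by positivity
    rw [mulN, if_neg hne]
    have hmod : (r + 2 ^ (k + 1)) % 2 = r % 2 := by omega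
    have hdiv : (r + 2 ^ (k + 1)) / 2 = r / 2 + 2 ^ k := by omega
    rw [hmod, hdiv, ih (stepA mod a) _ (r / 2) (by omega)]
    rw [← Function.iterate_succ_apply]
    by_cases hr0 : r = 0
    · subst hr0
      simp [mulN_zero]
    · have hR : mulN mod a r result
          = mulN mod (stepA mod a) (r / 2) (if r % 2 = 1 then PySem.Int.bxor result a else result) := by
        rw [mulN, if_neg hr0]
      rw [hR]

lemma buildProdsB_inv (mod i : Int) : ∀ (n k : Nat),
    buildProdsB mod ((stepA mod)^[k] i)
        ((List.range (2 ^ k)).map (fun r => mulN mod i r 0)) n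
      = ((List.range (2 ^ (k + n))).map (fun r => mulN mod i r 0), (stepA mod)^[k + n] i) := by
  intro n
  induction n with
  | zero => intro k; rfl
  | succ n ih =>
    intro k
    rw [buildProdsB]
    have hstep :
        (if PySem.Int.band (((stepA mod)^[k] i) <<< (1:Nat)) 256 ≠ 0 then
           PySem.Int.bxor (((stepA mod)^[k] i) <<< (1:Nat)) mod
         else ((stepA mod)^[k] i) <<< (1:Nat)) = (stepA mod)^[k + 1] i := by
      rw [Function.iterate_succ_apply']; rfl
    have hlist :
        (List.range (2 ^ k)).map (fun r => mulN mod i r 0)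
            ++ ((List.range (2 ^ k)).map (fun r => mulN mod i r 0)).map
                 (fun p => PySem.Int.bxor p ((stepA mod)^[k] i))
          = (List.range (2 ^ (k + 1))).map (fun r => mulN mod i r 0) := by
      have h2 : 2 ^ (k + 1) = 2 ^ k + 2 ^ k := by ring
      rw [h2, List.range_add, List.map_append, List.map_map, List.map_map]
      congr 1
      apply List.map_congr_left
      intro r hr
      simp only [List.mem_range] at hr
      simp only [Function.comp_apply]
      rw [Nat.add_comm (2 ^ k) r, mulN_add_pow mod k i 0 r hr]
    rw [hstep, hlist, ih (k + 1)]
    have : k + 1 + n = k + (n + 1) := by omega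
    rw [this]

lemma scan_eq_find (mod i : Int) : ∀ (n j : Nat), j + n = 256 →
    scanFirstB ((List.range' j n).map (fun r => mulN mod i r 0)) (j : Int)
      = findLoopA i mod j := by
  intro n
  induction n with
  | zero =>
    intro j hj
    rw [findLoopA, dif_neg (by omega)]
    rfl
  | succ n ih =>
    intro j hj
    rw [List.range'_succ, List.map_cons, scanFirstB, findLoopA, dif_pos (by omega : j < 256)]
    have hmul : aes_mul i (j : Int) mod = mulN mod i j 0 := by
      unfold aes_mul multiply_in_gf2
      exact mulLoopA_eq_mulN mod i j 0
    rw [hmul]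
    by_cases h1 : mulN mod i j 0 = 1
    · rw [if_pos h1, if_pos h1]
    · rw [if_neg h1, if_neg h1]
      have : ((j : Int) + 1) = ((j + 1 : Nat) : Int) := by push_cast; ring
      rw [this, ih (j + 1) (by omega)]

lemma per_i (mod i : Int) :
    findLoopA i mod 0 = scanFirstB (buildProdsB mod i [0] 8).1 0 := by
  have h0 : ((List.range (2 ^ 0)).map (fun r => mulN mod i r 0)) = [0] := by
    norm_num [List.range_one, mulN_zero]
  have hb := buildProdsB_inv mod i 8 0
  rw [h0] at hb
  simp only [Function.iterate_zero, id_eq] at hb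
  rw [hb]
  have : (List.range (2 ^ (0 + 8))).map (fun r => mulN mod i r 0)
      = (List.range' 0 256).map (fun r => mulN mod i r 0) := by
    rw [List.range_eq_range']
    norm_num
  rw [this]
  exact (scan_eq_find mod i 256 0 (by omega)).symm

-- ===== VERDICT (by name: the statement is the Claim_ definition above) =====
theorem make_sbox_spec : Claim_equal_make_sbox := by
  intro mod _
  unfold Spec_make_sbox make_sbox make_sbox_alt
  simp only [per_i]
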